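-- pv_equiv track=rewrite | github.com/yordanoswuletaw/codefores-solution | E_Binary_Inversions.py | invertZeros
-- ===== SOURCE A (Python) =====
-- def invertZeros(binary, inversions, zeros):
--     ones = 0
--     result = inversions
--     for each in binary:
--         if each:
--             ones += 1
--         else:
--             zeros -= 1
--             result = max(result, inversions + zeros - ones)
--     return result
-- ===== SOURCE B (Python) =====
-- def invertZeros(binary, inversions, zeros):
--     # The candidate inversions + zeros - ones strictly decreases at every
--     # later zero, so the maximum is attained at the FIRST zero: early exit.
--     ones = 0
--     for each in binary:
--         if each:
--             ones += 1
--         else: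
--             return max(inversions, inversions + zeros - 1 - ones)
--     return inversions
-- ===== Notes on version B (the rewrite author's own statement) =====
-- stated objective: simpler
-- what changed: B stops at the first zero and evaluates the closed-form candidate inversions+zeros-1-ones there (later zeros always yield strictly smaller candidates), instead of A's full running-maximum scan over all zeros.
import Mathlib
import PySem

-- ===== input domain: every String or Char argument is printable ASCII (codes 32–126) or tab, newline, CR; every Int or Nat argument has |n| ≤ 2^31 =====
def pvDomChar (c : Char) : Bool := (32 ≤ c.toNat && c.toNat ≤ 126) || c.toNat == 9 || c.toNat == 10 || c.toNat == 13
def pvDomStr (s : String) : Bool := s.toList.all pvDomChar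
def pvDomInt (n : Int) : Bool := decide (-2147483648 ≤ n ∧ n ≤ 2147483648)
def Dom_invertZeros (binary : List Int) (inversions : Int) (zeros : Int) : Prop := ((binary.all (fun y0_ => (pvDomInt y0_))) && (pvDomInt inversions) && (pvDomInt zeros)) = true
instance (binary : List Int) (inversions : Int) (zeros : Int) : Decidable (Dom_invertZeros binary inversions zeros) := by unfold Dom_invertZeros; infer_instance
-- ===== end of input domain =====

-- B stops at the first zero and returns the closed-form candidate there; simpler than A's full running-maximum scan.
-- ===== PORT A =====
def invertZeros (binary : List Int) (inversions : Int) (zeros : Int) : Int :=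
  -- state (ones, zeros, result), exactly A's loop
  (binary.foldl (fun (s : Int × Int × Int) each =>
      if each ≠ 0 then (s.1 + 1, s.2.1, s.2.2)
      else (s.1, s.2.1 - 1, max s.2.2 (inversions + (s.2.1 - 1) - s.1)))
    (0, zeros, inversions)).2.2

-- ===== PORT B =====
def altGo (inversions zeros : Int) : List Int → Int → Int
  | [], _ => inversions
  | each :: rest, ones =>
      if each ≠ 0 then altGo inversions zeros rest (ones + 1)
      else max inversions (inversions + zeros - 1 - ones)

def invertZeros_alt (binary : List Int) (inversions : Int) (zeros : Int) : Int :=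
  altGo inversions zeros binary 0

-- ===== PRECONDITION & SPEC =====
def Spec_invertZeros (binary : List Int) (inversions : Int) (zeros : Int) (out : Int) : Prop := out = invertZeros_alt binary inversions zeros
instance (binary : List Int) (inversions : Int) (zeros : Int) (out : Int) : Decidable (Spec_invertZeros binary inversions zeros out) := by unfold Spec_invertZeros; infer_instance

-- ===== CLAIM (what is proved, stated in full; the proofs are below) =====
def Claim_equal_invertZeros : Prop := ∀ (binary : List Int) (inversions : Int) (zeros : Int), Dom_invertZeros binary inversions zeros → Spec_invertZeros binary inversions zeros (invertZeros binary inversions zeros)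

-- ===== LEMMAS AND PROOFS =====

-- ===== VERDICT (by name: the statement is the Claim_ definition above) =====
-- value (zeros - 1 - ones) at the first zero of l, if any (zeros stays fixed along the prefix)
def firstCand : List Int → Int → Int → Option Int
  | [], _, _ => none
  | x :: xs, ones, zs => if x ≠ 0 then firstCand xs (ones + 1) zs else some (zs - 1 - ones)

-- once the running result dominates all future candidates, the fold leaves it unchanged
theorem fold_stable (inversions : Int) :
    ∀ (l : List Int) (o z r : Int), inversions + z - o ≤ r →
    (l.foldl (fun (s : Int × Int × Int) each =>
        if each ≠ 0 then (s.1 + 1, s.2.1, s.2.2)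
        else (s.1, s.2.1 - 1, max s.2.2 (inversions + (s.2.1 - 1) - s.1)))
      (o, z, r)).2.2 = r := by
  intro l
  induction l with
  | nil => intro o z r h; simp
  | cons x xs ih =>
    intro o z r h
    by_cases hx : x ≠ 0
    · simp only [List.foldl_cons, if_pos hx]
      exact ih (o + 1) z r (by omega)
    · simp only [List.foldl_cons, if_neg hx]
      have hmax : max r (inversions + (z - 1) - o) = r := by omega
      rw [hmax]
      exact ih o (z - 1) r (by omega)

-- characterisation of A's fold via the first zero
theorem foldA_char (inversions : Int) :
    ∀ (l : List Int) (o z r : Int),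
    (l.foldl (fun (s : Int × Int × Int) each =>
        if each ≠ 0 then (s.1 + 1, s.2.1, s.2.2)
        else (s.1, s.2.1 - 1, max s.2.2 (inversions + (s.2.1 - 1) - s.1)))
      (o, z, r)).2.2
    = match firstCand l o z with
      | none => r
      | some c => max r (inversions + c) := by
  intro l
  induction l with
  | nil => intro o z r; simp [firstCand]
  | cons x xs ih =>
    intro o z r
    by_cases hx : x ≠ 0
    · simp only [List.foldl_cons, if_pos hx, firstCand]
      exact ih (o + 1) z r
    · simp only [List.foldl_cons, if_neg hx, firstCand]
      rw [fold_stable inversions xs o (z - 1)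
        (max r (inversions + (z - 1) - o)) (by omega)]
      have he : inversions + (z - 1) - o = inversions + (z - 1 - o) := by ring
      rw [he]

-- characterisation of B via the first zero
theorem altGo_char (inversions zeros : Int) :
    ∀ (l : List Int) (o : Int),
    altGo inversions zeros l o
    = match firstCand l o zeros with
      | none => inversions
      | some c => max inversions (inversions + c) := by
  intro l
  induction l with
  | nil => intro o; simp [altGo, firstCand]
  | cons x xs ih =>
    intro o
    by_cases hx : x ≠ 0
    · simp only [altGo, if_pos hx, firstCand]
      exact ih (o + 1)
    · simp only [altGo, if_neg hx, firstCand]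
      have he : inversions + zeros - 1 - o = inversions + (zeros - 1 - o) := by ring
      rw [he]

-- ===== VERDICT (by name: the statement is the Claim_ definition above) =====
theorem invertZeros_spec : Claim_equal_invertZeros := by
  intro binary inversions zeros _
  unfold Spec_invertZeros invertZeros invertZeros_alt
  rw [foldA_char, altGo_char]
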